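/- GENERATED by mk_final_copies.py from the proof of the farm's unit `vorbis_decode_packet_rest.2a` (farm:vorbis_decode_packet_rest.2a.1: Lemmas.lean) as the
   re-elaboration sweep compiled it — do not edit. -/
import Asan.CheckWalk
import Vorbis.Spec.PacketRestFrame
import Vorbis.Spec.Reader
import Vorbis.Spec.Units.vorbis_decode_packet_rest_2a

/-!
  LEMMAS OF THE UNIT `vorbis_decode_packet_rest.2a` (0x1112d4–0x11138e and the return of `get_bits(f, 1)` at 0x111393).

  The segment is cut into two basic stretches, each a lemma of its own:

      seg2a_head   0x1112d4 … 0x1112e8   `i < f->channels` (one check site); `i ≥ C` leaves through `At8`;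
                                          `i < C` reaches 0x1112ee with the assertion `seg2a_AtB` (STABLE again, by `Stable.carry`)
      seg2a_body   0x1112ee … 0x111393   the six other check sites, the type-0 test (exit `At16`), `get_bits(f, 1)` (exit `At2b`)
-/

namespace Vorbis.Spec.vorbis_decode_packet_rest_2a
open X86 X86.User Asan Vorbis Vorbis.Spec Vorbis.Spec.vorbis_decode_packet_rest

variable {others : List Obj} {frames : List (Nat × FrameLayout)} {len : Nat} {Ar : Arena} {stored room : Int}
  {ysz : Nat → Nat} {mem : Mem} {f : Nat}

/-- The spill slot `[steady rsp + 0x40]` (`f`) as the walker normalises its address. A closed bit-vector fact, stated over a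
`Word` variable (inside a walk context `bv_decide` would abstract the whole context). -/
theorem seg2a_slot_40 (x : Word) : x - 2936 = x - 3000 + 0x40 := by
  bv_decide

/-- **The assertion at 0x1112ee** (line 3226, after `i < f->channels` was tested): STABLE ∧ `r14 = i`, `i < C` ∧ `r13 = map`.
`At2` with the strict bound, at the address after the branch 0x1112e8. -/
structure seg2a_AtB (u₀ : State) (others : List Obj) (frames : List (Nat × FrameLayout)) (len : Nat) (Ar : Arena)
    (stored room : Int) (mode : Nat) (ysz : Nat → Nat) (u : State) (ret : Word)
    (i : Nat) (v : State) : Prop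
    extends Stable u₀ others frames len Ar stored room mode ysz u ret (lsOf u) v where
  /-- the address after the branch 0x1112e8 -/
  rip : v.rip = 0x1112ee
  /-- the channel index -/
  r14 : v.reg .r14 = UInt64.ofNat i
  /-- `i < f->channels` (the branch 0x1112e8 was not taken) -/
  i_lt : (i : Int) < stb_vorbis.channels v.mem (fOf u)
  /-- `r13 = map` -/
  r13 : (v.reg .r13).toNat = mapOf v.mem (fOf u) (mOf u)

set_option maxRecDepth 8000 in
set_option maxHeartbeats 16000000 in
/-- **The first basic block of segment .2a** (0x1112d4 … 0x1112e8, line 3225 `i < f->channels`): the check of `f->channels`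
(0x1112dd, a field of `*f`) passes; `i ≥ C` leaves through the exit `At8` (0x111457), rebuilt with the tree's `Stable.carry` over the one
scratch store (the return address of the check call); `i < C` continues at 0x1112ee with `seg2a_AtB`, which is the hypothesis
`hrest`. -/
theorem seg2a_head {Lay : Layout} (hLay : Lay.hi = 0x1000000) {μ : Microarch} (hμ : UserX.MicroOK μ) {u₀ : State}
    (hcode : HasCodeNat Lay u₀ Vorbis.L.vorbis_decode_packet_rest.entry Vorbis.Code.code_vorbis_decode_packet_rest.nat
      Vorbis.L.vorbis_decode_packet_rest.size)
    (hload4 : Asan.SmallCheck Lay μ Vorbis.WayInv (Vorbis.CodeOK u₀) [.rax, .rcx, .rdx] 4 Vorbis.L.__asan_load4_noabort.entry)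
    {mode : Nat} {e v : State} {ret : Word} {i : Nat}
    (hat : At2 u₀ others frames len Ar stored room mode ysz e ret i v)
    (Post : State → Prop)
    (hpost : ∀ w, At8 u₀ others frames len Ar stored room mode ysz e ret w → Post w)
    (hrest : ∀ s : State, seg2a_AtB u₀ others frames len Ar stored room mode ysz e ret i s →
      ReachVia Lay μ Vorbis.WayInv s Post) :
    ReachVia Lay μ Vorbis.WayInv v Post := by
  have he := hat.entry
  v_entry he
  have w_rip := hat.rip
  have w_rsp : v.reg .rsp = e.reg .rsp - 3000 := hat.rsp
  have w_r14 := hat.r14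
  have w_eq : Mem.EqOn Vorbis.L.textLo Vorbis.L.textHi u₀.mem v.mem := hat.code
  have hdf : v.flags .df = false := (show abiInv _ from hat.abi).1
  have hmx : v.mxcsr &&& 0x1F80 = 0x1F80 := (show abiInv _ from hat.abi).2
  have hsse := Vorbis.sseOK_of_abiInv hat.abi
  have s_f : v.mem.readLE (e.reg .rsp - 2936) 8 = (e.reg .rdi).toNat := by
    have h := hat.slot_f
    have ea : e.reg .rsp - 2936 = spOf e + 0x40 := seg2a_slot_40 (e.reg .rsp)
    rw [ea]
    exact h
  have hvsp : v.reg .rsp = e.reg .rsp - 3000 := hat.rsp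
  have hv14 : v.reg .r14 = UInt64.ofNat i := hat.r14
  have hinv := hat.inv
  have hvok := hinv.fb.vorbis
  have hcfg := hinv.config
  have hL := hinv.live
  obtain ⟨hfoff0, hfin0⟩ := SpanOK.geom_obj hinv he_top
  have hfoff : (e.reg .rdi).toNat + 1808 ≤ 0x700000 ∨ 0x800020 ≤ (e.reg .rdi).toNat := hfoff0
  have hfin : (e.reg .rdi).toNat + 1808 ≤ 0xC00000 := hfin0
  have hsh := hat.shadow
  -- the channel count
  obtain ⟨C, hC⟩ : ∃ C : Nat, v.mem.readLE (e.reg .rdi + 4) 4 = C := ⟨_, rfl⟩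
  have hClt : C < 2 ^ 32 := by
    rw [← hC]
    exact Mem.readLE_lt' _ _ 4
  have hch : stb_vorbis.channels v.mem (fOf e) = sint32 C := by
    rw [← hC]
    have ea : addr ((e.reg .rdi).toNat + 4) = e.reg .rdi + 4 := by
      rw [← addr_add_lit]
      unfold addr
      rw [UInt64.ofNat_toNat]
    rw [← ea]
    rfl
  have hHD1 := hcfg.header.HD1
  rw [hch] at hHD1
  have hC16 : 1 ≤ C ∧ C ≤ 16 := by
    rcases sint32_cases C with h | h <;> omega
  have hsC : sint32 C = (C : Int) := by
    rcases sint32_cases C with h | h <;> omega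
  have hile : i ≤ C := by
    have := hat.i_le
    rw [hch, hsC] at this
    omega
  -- the mode record lies inside `mode_config`
  have hm : fOf e + 484 ≤ mOf e ∧ mOf e + 6 ≤ fOf e + 868 := mode_record_inside hat.pre
  u_walk hcode [hμ.vendor] until [Vorbis.L.vorbis_decode_packet_rest.cut22, 0x1112ee] span [Vorbis.L.textLo, Vorbis.L.textHi] side (v_side)
  · -- 0x1112dd, load4 [f + 4] (`f->channels`): a field of `*f`
    have hun : ShadowUntouched v.mem s_1112dd.mem := by v_untouched
    have hs := hvok.bits.site_field hL 4 4 (by omega) (by omega) rfl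
    exact Vorbis.Spec.check_site hsh hun hs (by u_omega)
  · -- 0x1112e8 taken: `i ≥ C`, the exit to segment .8 at 0x111457
    refine ReachVia.done (hpost _ ?_)
    have hs : Mem.SameExcept [⟨(e.reg .rsp).toNat - 3008, (e.reg .rsp).toNat - 3000⟩] v.mem s_1112e8.mem := by
      u_same
    have hsp : ∀ w, w ∈ [(⟨(e.reg .rsp).toNat - 3008, (e.reg .rsp).toNat - 3000⟩ : Span)] →
        SpanOK ysz v.mem (e.reg .rsp).toNat (fOf e) w := by
      intro w hw
      rw [List.mem_singleton.mp hw]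
      exact SpanOK.below (by simp only []; omega) (by simp only []; omega)
    have hun : ShadowUntouched v.mem s_1112e8.mem := by v_untouched
    have hobj : (objBlock (fOf e)).Same v.mem s_1112e8.mem := by
      apply hs.eqOn
      intro w hw
      rw [List.mem_singleton.mp hw]
      simp only [vblock, voff]
      omega
    have hbits : Bits (RunBlk Ar len) len s_1112e8.mem (fOf e) :=
      hvok.bits.frame_fields (Bits.SameFields.of_same hobj)
    have habi : abiInv s_1112e8 := by v_inv
    have hst := Stable.carry hat.toStable hs hsp hun w_rsp w_eq habi hbits
    obtain ⟨ech, emode, _, _⟩ := config_carry hinv he_room he_top hs hsp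
    refine { toStable := hst, rip := w_rip, rax := ?_, r13 := ?_ }
    · -- eax = C, zero-extended
      unfold nchan
      rw [ech, hch, hsC, Int.toNat_natCast, w_rax]
      apply UInt64.toNat_inj.mp
      rw [Vorbis.toNat_ofBV32, BitVec.toNat_ofNat, UInt64.toNat_ofNat']
      omega
    · -- r13 = map
      rw [w_kept .r13 rfl, (emode (mOf e) hm.1 hm.2).2]
      exact hat.r13
  · -- 0x1112e8 not taken: `i < C`; the rest of the segment (0x1112ee …) is the hypothesis `hrest`
    have hlt : (i : Int) < stb_vorbis.channels v.mem (fOf e) := by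
      rw [hch, hsC]
      have h1 : (BitVec.ofNat 32 C).toInt = (C : Int) := by
        rw [Vorbis.toInt_ofNat32 C hClt, hsC]
      have h2 : (Word.part .w32 (UInt64.ofNat i)).toInt = (i : Int) := by
        rw [Vorbis.Spec.part32_toInt, UInt64.toNat_ofNat']
        rcases sint32_cases (i % 2 ^ 64 % 2 ^ 32) with h | h <;> omega
      rw [h1, h2] at hbr_1112e8
      omega
    apply hrest s_1112e8
    have hs : Mem.SameExcept [⟨(e.reg .rsp).toNat - 3008, (e.reg .rsp).toNat - 3000⟩] v.mem s_1112e8.mem := by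
      u_same
    have hsp : ∀ w, w ∈ [(⟨(e.reg .rsp).toNat - 3008, (e.reg .rsp).toNat - 3000⟩ : Span)] →
        SpanOK ysz v.mem (e.reg .rsp).toNat (fOf e) w := by
      intro w hw
      rw [List.mem_singleton.mp hw]
      exact SpanOK.below (by simp only []; omega) (by simp only []; omega)
    have hun : ShadowUntouched v.mem s_1112e8.mem := by v_untouched
    have hobj : (objBlock (fOf e)).Same v.mem s_1112e8.mem := by
      apply hs.eqOn
      intro w hw
      rw [List.mem_singleton.mp hw]
      simp only [vblock, voff]
      omega
    have hbits : Bits (RunBlk Ar len) len s_1112e8.mem (fOf e) :=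
      hvok.bits.frame_fields (Bits.SameFields.of_same hobj)
    have habi : abiInv s_1112e8 := by v_inv
    have hst := Stable.carry hat.toStable hs hsp hun w_rsp w_eq habi hbits
    obtain ⟨ech, emode, _, _⟩ := config_carry hinv he_room he_top hs hsp
    refine { toStable := hst, rip := w_rip, r14 := ?_, i_lt := ?_, r13 := ?_ }
    · rw [w_kept .r14 rfl]
      exact hv14
    · rw [ech]
      exact hlt
    · rw [w_kept .r13 rfl, (emode (mOf e) hm.1 hm.2).2]
      exact hat.r13

variable {u₀ : State} {mode : Nat} {e v : State} {ret : Word}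

/-! ### Pure lemmas: the mapping record, the frame object `zero_channel`, two closed bit facts -/

/-- **The mode number is a mode of the CURRENT memory**: `mode_count` is not in a decode-time hole of `*f`, and the function's
footprint so far (`Frame.same`) is made of decode-time stores (`footprint_storeOK`). (From the worker of segment .8.) -/
theorem seg2a_mode_lt_now (h : Frame u₀ others frames len Ar stored room mode ysz e ret v)
    (hroom : 0x700000 + 3856 ≤ (e.reg .rsp).toNat) :
    (mode : Int) < stb_vorbis.mode_count v.mem (fOf e) := by
  have hpre := h.pre
  obtain ⟨hsh, hinv, hargs⟩ := hpre
  have hd : DecodeSame (fOf e) e.mem v.mem :=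
    StoreOK.decodeSame hinv.ok hinv.ob1 hinv.sep h.same (fun s hs => footprint_storeOK h.pre hroom s hs)
  have e1 := hd.i32 480 (by decide)
  have hm := hargs.mode_lt
  simp only [vacc, voff] at hm ⊢
  rw [e1]
  exact hm

/-- **MP2 – MP6 of the mapping record `map = &f->mapping[m->mapping]`** in the current memory. -/
theorem seg2a_map_ok (h : Frame u₀ others frames len Ar stored room mode ysz e ret v)
    (hroom : 0x700000 + 3856 ≤ (e.reg .rsp).toNat) :
    MappingAtOK (RunBlk Ar len) v.mem (fOf e) (mapOf v.mem (fOf e) (mOf e)) := by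
  have hv := h.inv.fb.vorbis
  have hm := seg2a_mode_lt_now h hroom
  have hargs := h.pre.2.2
  unfold mapOf
  rw [hargs.m_eq]
  exact hv.mapping.of_mode hv.mode hm

/-- **Where the mapping record is**: its 56 bytes lie in the data space and off the stack region (it is part of the allocated
block of MP1). -/
theorem seg2a_map_where (h : Frame u₀ others frames len Ar stored room mode ysz e ret v)
    (hroom : 0x700000 + 3856 ≤ (e.reg .rsp).toNat) :
    0x100000 ≤ mapOf v.mem (fOf e) (mOf e) ∧ mapOf v.mem (fOf e) (mOf e) + 56 ≤ 0xC00000 ∧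
      (mapOf v.mem (fOf e) (mOf e) + 56 ≤ 0x700000 ∨ 0x800000 ≤ mapOf v.mem (fOf e) (mOf e)) := by
  have hv := h.inv.fb.vorbis
  have hm := seg2a_mode_lt_now h hroom
  have hargs := h.pre.2.2
  have hlt := hv.mode.mapping_lt hm
  have hblk := hv.mapping.MP1_block
  have hin := h.inv.ok.inside _ hblk
  have hoff := h.inv.offStack _ hblk
  have hmp1 := hv.mapping.MP1
  unfold mapOf
  rw [hargs.m_eq]
  simp only [vacc, voff] at hlt hblk hin hoff hmp1 ⊢
  omega

/-- **Where the `chan` block of the mapping record is** (MP2: `3·C` bytes): in the data space, off the stack region. -/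
theorem seg2a_chan_where (h : Frame u₀ others frames len Ar stored room mode ysz e ret v)
    (hroom : 0x700000 + 3856 ≤ (e.reg .rsp).toNat) :
    0x100000 ≤ Mapping.chan v.mem (mapOf v.mem (fOf e) (mOf e)) ∧
      Mapping.chan v.mem (mapOf v.mem (fOf e) (mOf e)) + 3 * nchan v.mem (fOf e) ≤ 0xC00000 ∧
      (Mapping.chan v.mem (mapOf v.mem (fOf e) (mOf e)) + 3 * nchan v.mem (fOf e) ≤ 0x700000 ∨
        0x800000 ≤ Mapping.chan v.mem (mapOf v.mem (fOf e) (mOf e))) := by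
  have hblk := (seg2a_map_ok h hroom).MP2
  have hin := h.inv.ok.inside _ hblk
  have hoff := h.inv.offStack _ hblk
  simp only [voff] at hblk hin hoff
  omega

/-- **A check site in the mapping record** (`map + off`): MP1. -/
theorem seg2a_site_map (h : Frame u₀ others frames len Ar stored room mode ysz e ret v)
    (hroom : 0x700000 + 3856 ≤ (e.reg .rsp).toNat) (off n : Nat) (hoff : off + n ≤ 56) (hn : 1 ≤ n) :
    Site (LiveSet others (framesIn frames e)) (mapOf v.mem (fOf e) (mOf e) + off) n := by
  have hv := h.inv.fb.vorbis
  have hm := seg2a_mode_lt_now h hroom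
  have hargs := h.pre.2.2
  refine hv.mapping.site_record h.inv.live (hv.mode.mapping_lt hm) off n (by simp only [voff]; omega) hn ?_
  unfold mapOf
  rw [hargs.m_eq]

/-- `zero_channel[256]` (1024 bytes at offset 512 of the frame whose base is `entry rsp − 2872`, i.e. at `steady rsp + 0x280`)
is a live object inside the function: the third object of its own protected frame, which `framesIn` puts in front. -/
theorem seg2a_zc_obj (others : List Obj) (frames : List (Nat × FrameLayout)) (u : State) :
    (⟨(u.reg .rsp).toNat - 2872 + 512, 1024, .stack⟩ : Obj) ∈ stackObjs (framesIn frames u) ++ others := by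
  unfold framesIn
  rw [stackObjs_cons]
  apply List.mem_append_left
  apply List.mem_append_left
  exact List.mem_cons_of_mem _ (List.mem_cons_of_mem _ List.mem_cons_self)

/-- `movzx ebx, byte [m] ; movsxd rbx, ebx` of a byte below 16 (a submap number): the byte itself. A closed fact, checked for
the sixteen values. -/
theorem seg2a_zx8_sext (x : Nat) (hx : x < 16) :
    Word.ofBV (BitVec.signExtend 64 (BitVec.zeroExtend 32 (BitVec.ofNat 8 x))) = UInt64.ofNat x := by
  have h : ∀ j : Fin 16,
      Word.ofBV (BitVec.signExtend 64 (BitVec.zeroExtend 32 (BitVec.ofNat 8 j.val))) = UInt64.ofNat j.val := by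
    decide
  exact h ⟨x, hx⟩

/-- `movzx ebx, byte [m] ; movzx eax, bl` of a byte below 64 (a floor number): the byte itself. A closed fact, checked for
the sixty-four values. -/
theorem seg2a_zx8_zx8 (x : Nat) (hx : x < 64) :
    Word.ofBV (BitVec.zeroExtend 32 (BitVec.setWidth 8 (BitVec.zeroExtend 32 (BitVec.ofNat 8 x)))) = UInt64.ofNat x := by
  have h : ∀ j : Fin 64,
      Word.ofBV (BitVec.zeroExtend 32 (BitVec.setWidth 8 (BitVec.zeroExtend 32 (BitVec.ofNat 8 j.val)))) =
        UInt64.ofNat j.val := by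
    decide
  exact h ⟨x, hx⟩

set_option maxRecDepth 8000 in
set_option maxHeartbeats 16000000 in
/-- **The rest of segment .2a** (0x1112ee … 0x11138e and the return at 0x111393; lines 3226–3233), from the assertion `seg2a_AtB`:
ONE walk. Before it, every value the code loads is named (`chan`, `mux`, `floor`, `floor_types[floor]`, `floor_config`) and every
computed address that is not `register + literal` is an ATOM with its number (`pmux`, `pzc`, `pfl`, `pft`): the Word equations that
say so are kept OUT of the arithmetic context (`Unit → …`: `u_omega` normalises every Word equation it sees into nested `%`
terms, on which `omega` is incomplete) and handed to the walker as rewrite rules. The six check sites: the mapping record (MP1),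
the `chan` block (MP2), the frame object `zero_channel`, fields of `*f`. `je` taken at 0x11135b: the exit `At16` (dead by FL3,
which is segment .16's argument); otherwise `g = floor_config + 1596 floor` (MP5, MP6: a floor of `f`) and `get_bits(f, 1)`; at its
return `At2b`. STABLE at both exits: `Stable.carry` over one literal span list. -/
theorem seg2a_body {Lay : Layout} (hLay : Lay.hi = 0x1000000) {μ : Microarch} (hμ : UserX.MicroOK μ)
    (hcode : HasCodeNat Lay u₀ Vorbis.L.vorbis_decode_packet_rest.entry Vorbis.Code.code_vorbis_decode_packet_rest.nat
      Vorbis.L.vorbis_decode_packet_rest.size)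
    (hload8 : Asan.SmallCheck Lay μ Vorbis.WayInv (Vorbis.CodeOK u₀) [.rax, .rcx, .rdx] 8 Vorbis.L.__asan_load8_noabort.entry)
    (hload1 : Asan.SmallCheck Lay μ Vorbis.WayInv (Vorbis.CodeOK u₀) [.rax, .rdx] 1 Vorbis.L.__asan_load1_noabort.entry)
    (hstore4 : Asan.SmallCheck Lay μ Vorbis.WayInv (Vorbis.CodeOK u₀) [.rax, .rcx, .rdx] 4 Vorbis.L.__asan_store4_noabort.entry)
    (hload2 : Asan.SmallCheck Lay μ Vorbis.WayInv (Vorbis.CodeOK u₀) [.rax, .rcx, .rdx] 2 Vorbis.L.__asan_load2_noabort.entry)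
    (hgb : Calls Lay μ Vorbis.WayInv (Vorbis.conv u₀) Vorbis.L.get_bits.entry
      (Vorbis.Spec.get_bits.spec others (framesIn frames e) (RunBlk Ar len) len))
    {i : Nat}
    (hat : seg2a_AtB u₀ others frames len Ar stored room mode ysz e ret i v) :
    ReachVia Lay μ Vorbis.WayInv v (fun w => At8 u₀ others frames len Ar stored room mode ysz e ret w ∨
      At16 u₀ others frames len Ar stored room mode ysz e ret w ∨
      At2b u₀ others frames len Ar stored room mode ysz e ret i w) := by
  have he := hat.entry
  v_entry he
  have hf := hat.toStable.toFrame
  have w_rip := hat.rip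
  have c_rsp : v.reg .rsp = e.reg .rsp - 3000 := hat.rsp
  have c_r14 : v.reg .r14 = UInt64.ofNat i := hat.r14
  have w_eq : Mem.EqOn Vorbis.L.textLo Vorbis.L.textHi u₀.mem v.mem := hat.code
  have hdf : v.flags .df = false := (show abiInv _ from hat.abi).1
  have hmx : v.mxcsr &&& 0x1F80 = 0x1F80 := (show abiInv _ from hat.abi).2
  have hsse := Vorbis.sseOK_of_abiInv hat.abi
  have w_kept : RegsKept [.rsp] v v := RegsKept.refl _ _
  have s_f : v.mem.readLE (e.reg .rsp - 2936) 8 = (e.reg .rdi).toNat := by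
    have h := hat.slot_f
    have ea : e.reg .rsp - 2936 = spOf e + 0x40 := seg2a_slot_40 (e.reg .rsp)
    rw [ea]
    exact h
  have hinv := hat.inv
  have hvok := hinv.fb.vorbis
  have hcfg := hinv.config
  have hL := hinv.live
  obtain ⟨hfoff0, hfin0⟩ := SpanOK.geom_obj hinv he_top
  have hfoff : (e.reg .rdi).toNat + 1808 ≤ 0x700000 ∨ 0x800020 ≤ (e.reg .rdi).toNat := hfoff0
  have hfin : (e.reg .rdi).toNat + 1808 ≤ 0xC00000 := hfin0
  have hsh := hat.shadow
  -- HD1: at most 16 channels, so `i < 16`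
  have hC16 : stb_vorbis.channels v.mem (fOf e) ≤ 16 := hcfg.header.HD1.2
  have hilt := hat.i_lt
  have hi16 : i < 16 := by omega
  have hsx : Unit → _ := fun _ => cnt32_sext i (by omega)
  -- the mapping record
  obtain ⟨mp, hmpdef⟩ : ∃ mp, mapOf v.mem (fOf e) (mOf e) = mp := ⟨_, rfl⟩
  have hr13n : (v.reg .r13).toNat = mp := by
    rw [← hmpdef]
    exact hat.r13
  obtain ⟨hmw1, hmw2, hmw3⟩ := seg2a_map_where hf he_room
  rw [hmpdef] at hmw1 hmw2 hmw3
  obtain ⟨chan, hchdef⟩ : ∃ chan, Mapping.chan v.mem mp = chan := ⟨_, rfl⟩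
  obtain ⟨hcw1, hcw2, hcw3⟩ := seg2a_chan_where hf he_room
  rw [hmpdef, hchdef] at hcw1 hcw2 hcw3
  have rch0 : v.mem.readLE (v.reg .r13 + 8) 8 = chan := by
    rw [eq_addr _ _ hr13n]
    simp only [vacc, voff] at hchdef
    simp only [vfield]
    exact hchdef
  -- `mux = map->chan[i].mux`
  have hmapok := seg2a_map_ok hf he_room
  rw [hmpdef] at hmapok
  obtain ⟨mux, hmuxdef⟩ : ∃ mux, MappingChannel.mux v.mem (Mapping.chan_at v.mem mp i) = mux := ⟨_, rfl⟩
  have hmuxlt := hmapok.mux_lt hilt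
  rw [hmuxdef] at hmuxlt
  have hnch : i < nchan v.mem (fOf e) := by
    rw [nchan_def]
    omega
  have hcb1 : chan + 3 * i + 3 ≤ 12582912 := by omega
  have hcb2 : chan + 3 * i + 3 ≤ 7340032 ∨ 8388608 ≤ chan := by omega
  clear hcw2 hcw3
  -- the address of `chan[i].mux`, as an atom with its number
  obtain ⟨pmux, hpmux⟩ : ∃ pmux : Word, Unit → UInt64.ofNat i + UInt64.ofNat i * 2 + UInt64.ofNat chan + 2 = pmux :=
    ⟨_, fun _ => rfl⟩
  have hpmuxn : pmux.toNat = chan + 3 * i + 2 := by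
    rw [← hpmux ()]
    clear hfoff0 hfoff hmw3 hcb2
    u_omega
  have rmux : v.mem.readLE pmux 1 = mux := by
    rw [eq_addr _ _ hpmuxn, ← hmuxdef, ← hchdef]
    simp only [vacc, voff]
    rfl
  have hzs : Unit → _ := fun _ => seg2a_zx8_sext mux hmuxlt.2
  -- the address of `zero_channel[i]`, as an atom with its number
  obtain ⟨pzc, hpzc⟩ : ∃ pzc : Word, Unit → e.reg .rsp - 3000 + UInt64.ofNat i * 4 + 640 = pzc := ⟨_, fun _ => rfl⟩
  have hpzcn : pzc.toNat = (e.reg .rsp).toNat - 2360 + 4 * i := by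
    rw [← hpzc ()]
    clear hfoff0 hfoff hmw3 hcb2
    u_omega
  have hfoffU : Unit → (fOf e + 1808 ≤ 7340032 ∨ 8388640 ≤ fOf e) := fun _ => hfoff0
  clear hfoff0
  have s_f' : UInt64.ofNat (v.mem.readLE (e.reg .rsp - 2936) 8) = e.reg .rdi := by
    rw [s_f, UInt64.ofNat_toNat]
  -- `floor = map->submap_floor[mux]`
  obtain ⟨fl, hfldef⟩ : ∃ fl, Mapping.submap_floor v.mem mp mux = fl := ⟨_, rfl⟩
  have hfllt : (fl : Int) < stb_vorbis.floor_count v.mem (fOf e) := by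
    rw [← hfldef, ← hmuxdef]
    exact hmapok.floor_of_mux_lt hilt
  have hFL1 := hvok.floor.toFloorShape.FL1
  have hfl64 : fl < 64 := by omega
  obtain ⟨pfl, hpfl⟩ : ∃ pfl : Word, Unit → v.reg .r13 + UInt64.ofNat mux + 17 = pfl := ⟨_, fun _ => rfl⟩
  have hpfln : pfl.toNat = mp + 17 + mux := by
    rw [← hpfl ()]
    clear hfoff hmw3 hcb2
    u_omega
  have rfl' : v.mem.readLE pfl 1 = fl := by
    rw [eq_addr _ _ hpfln, ← hfldef]
    simp only [vacc, voff]
    rfl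
  have hzz : Unit → _ := fun _ => seg2a_zx8_zx8 fl hfl64
  -- the mode record lies inside `mode_config`
  have hm : fOf e + 484 ≤ mOf e ∧ mOf e + 6 ≤ fOf e + 868 := mode_record_inside hat.pre
  -- `f->floor_types[floor]`
  obtain ⟨ft, hftdef⟩ : ∃ ft, stb_vorbis.floor_types v.mem (fOf e) fl = ft := ⟨_, rfl⟩
  have hft16 : ft < 65536 := by
    rw [← hftdef]
    simp only [vacc, voff]
    exact Mem.u16_lt _ _
  obtain ⟨pft, hpft⟩ : ∃ pft : Word, Unit → e.reg .rdi + (UInt64.ofNat fl + 88) * 2 + 4 = pft := ⟨_, fun _ => rfl⟩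
  have hpftn : pft.toNat = (e.reg .rdi).toNat + 180 + 2 * fl := by
    rw [← hpft ()]
    clear hfoff hmw3 hcb2
    u_omega
  have hpftn2 : (e.reg .rdi + UInt64.ofNat fl * 2 + 180).toNat = (e.reg .rdi).toNat + 180 + 2 * fl := by
    clear hfoff hmw3 hcb2
    u_omega
  have rft : v.mem.readLE pft 2 = ft := by
    rw [eq_addr _ _ hpftn, ← hftdef]
    simp only [vacc, voff]
    rfl
  -- `f->floor_config`
  obtain ⟨fc, hfcdef⟩ : ∃ fc, stb_vorbis.floor_config v.mem (fOf e) = fc := ⟨_, rfl⟩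
  have rfc : v.mem.readLE (e.reg .rdi + 312) 8 = fc := by
    rw [← hfcdef]
    simp only [vacc, voff]
    have ea : addr ((e.reg .rdi).toNat + 312) = e.reg .rdi + 312 := by
      rw [← addr_add_lit]
      unfold addr
      rw [UInt64.ofNat_toNat]
    rw [← ea]
    rfl
  -- `g = &f->floor_config[floor]`
  have hgdef : stb_vorbis.floor_config_at v.mem (fOf e) fl = fc + 1596 * fl := by
    rw [← hfcdef]
    simp only [vacc, voff]
  have hgin := hvok.floor.toFloorShape.elem_inside (IsFloor.of_lt hfllt) hinv.ok
  rw [hgdef] at hgin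
  have hgn : (UInt64.ofNat fl * 1596 + UInt64.ofNat fc).toNat = fc + 1596 * fl := by
    clear hfoff hmw3 hcb2
    u_omega
  u_walk hcode [hμ.vendor, hzz (), hsx (), hzs (), hpmux (), hpzc (), hpfl (), hpft ()] until [Vorbis.L.vorbis_decode_packet_rest.cut17, Vorbis.L.vorbis_decode_packet_rest.cut1] span [Vorbis.L.textLo, Vorbis.L.textHi] side (v_side)
  case check_1112f2 =>
    -- 0x1112f2, load8 `[map + 8]` (`map->chan`): inside the mapping record (MP1)
    have hun : ShadowUntouched v.mem s_1112f2.mem := by v_untouched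
    refine check_site hsh hun (seg2a_site_map hf he_room 8 8 (by omega) (by omega)) ?_
    rw [hmpdef]
    clear hfoff hmw3 hcb2
    u_omega
  case check_111307 =>
    -- 0x111307, load1 `chan[i].mux` (`chan + 3 i + 2`): inside the `chan` block (MP2)
    have hun : ShadowUntouched v.mem s_111307.mem := by v_untouched
    refine check_site hsh hun (hmapok.site_chan hL hilt 2 1 (by simp only [voff]; omega) (by omega) rfl) ?_
    rw [hpmuxn, ← hchdef]
    simp only [vacc, voff]
  case check_111318 =>
    -- 0x111318, store4 `zero_channel[i]`: an object of the function's own protected frame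
    have hun : ShadowUntouched v.mem s_111318.mem := by v_untouched
    refine Vorbis.check_small hsh hun (seg2a_zc_obj others frames e) (by decide) ?_ ?_
    · show (e.reg .rsp).toNat - 2872 + 512 ≤ _
      omega
    · show _ ≤ (e.reg .rsp).toNat - 2872 + 512 + 1024
      omega
  case check_111330 =>
    -- 0x111330, load1 `map->submap_floor[mux]` (`map + 17 + mux`, `mux < 16`): inside the mapping record
    have hun : ShadowUntouched v.mem s_111330.mem := by v_untouched
    refine check_site hsh hun (seg2a_site_map hf he_room (17 + mux) 1 (by omega) (by omega)) ?_
    rw [hmpdef, hpfln]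
    omega
  case check_11134f =>
    -- 0x11134f, load2 `f->floor_types[floor]` (`f + 180 + 2 floor`, `floor < 64`): a field of `*f`
    have hun : ShadowUntouched v.mem s_11134f.mem := by v_untouched
    have hs := hvok.bits.site_field hL (180 + 2 * fl) 2 (by omega) (by omega) rfl
    refine check_site hsh hun hs ?_
    rw [hpftn2]
    show _ = (e.reg .rdi).toNat + _
    omega
  case check_11136d =>
    -- 0x11136d, load8 `f->floor_config` (`f + 312`): a field of `*f`
    have hun : ShadowUntouched v.mem s_11136d.mem := by v_untouched
    have hs := hvok.bits.site_field hL 312 8 (by omega) (by omega) rfl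
    refine check_site hsh hun hs ?_
    clear hfoff hmw3 hcb2
    u_omega
  case call_inv =>
    v_inv
  case pre_11138e =>
    -- get_bits's precondition: the shadow layer at the callee's entry, `ReaderEnv`, `Bits` (no store into `*f`), `n = 1`
    have hun : ShadowUntouched v.mem s_11138e.mem := by v_untouched
    have hs : Mem.SameExcept [⟨(e.reg .rsp).toNat - 3008, (e.reg .rsp).toNat - 3000⟩,
        ⟨(e.reg .rsp).toNat - 2360, (e.reg .rsp).toNat - 1336⟩] v.mem s_11138e.mem := by
      u_same
    have hobj : (objBlock (fOf e)).Same v.mem s_11138e.mem := by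
      have hfo := hfoffU ()
      apply hs.eqOn
      intro w hw
      simp only [List.mem_cons, List.mem_nil_iff, or_false] at hw
      rcases hw with rfl | rfl <;> simp only [vblock, voff] <;> omega
    have hbits : Bits (RunBlk Ar len) len s_11138e.mem (fOf e) :=
      hvok.bits.frame_fields (Bits.SameFields.of_same hobj)
    have etop : (s_11138e.reg .rsp).toNat + 8 = (spOf e).toNat := by
      rw [w_rsp]
      clear hfoff hmw3 hcb2
      u_omega
    refine ⟨⟨⟨?_, hat.pre.1.offText⟩, ?_, ?_⟩, ?_⟩
    · rw [etop]
      exact hsh.untouched hun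
    · rw [w_rdi]
      exact hinv.readerEnv
    · rw [w_rdi]
      exact hbits
    · rw [bitsArg_def, w_rsi]
      decide
  case cont =>
    -- 0x11135b taken: `floor_types[floor] == 0`, the exit to segment .16 at 0x110c44 (dead by FL3: segment .16's argument)
    refine ReachVia.done (Or.inr (Or.inl ?_))
    have hs : Mem.SameExcept [⟨(e.reg .rsp).toNat - 3008, (e.reg .rsp).toNat - 3000⟩,
        ⟨(e.reg .rsp).toNat - 2360, (e.reg .rsp).toNat - 1336⟩] v.mem s_11135b.mem := by
      u_same
    have hsp : ∀ w, w ∈ [(⟨(e.reg .rsp).toNat - 3008, (e.reg .rsp).toNat - 3000⟩ : Span),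
        ⟨(e.reg .rsp).toNat - 2360, (e.reg .rsp).toNat - 1336⟩] →
        SpanOK ysz v.mem (e.reg .rsp).toNat (fOf e) w := by
      intro w hw
      simp only [List.mem_cons, List.mem_nil_iff, or_false] at hw
      rcases hw with rfl | rfl
      · exact SpanOK.below (by simp only []; omega) (by simp only []; omega)
      · exact Or.inl ⟨by simp only []; omega, by simp only []; omega, Or.inr (Or.inr (Or.inr (by simp only []; omega)))⟩
    have hun : ShadowUntouched v.mem s_11135b.mem := by v_untouched
    have hobj : (objBlock (fOf e)).Same v.mem s_11135b.mem := by
      have hfo := hfoffU ()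
      apply hs.eqOn
      intro w hw
      simp only [List.mem_cons, List.mem_nil_iff, or_false] at hw
      rcases hw with rfl | rfl <;> simp only [vblock, voff] <;> omega
    have hbits : Bits (RunBlk Ar len) len s_11135b.mem (fOf e) :=
      hvok.bits.frame_fields (Bits.SameFields.of_same hobj)
    have habi : abiInv s_11135b := by v_inv
    have hst := Stable.carry hat.toStable hs hsp hun w_rsp w_eq habi hbits
    have E2 := carry_eqOn hinv he_room he_top hs hsp (fOf e + 144) (fOf e + 1484) (by omega) (by omega) (by omega)
    have ec : stb_vorbis.floor_count s_11135b.mem (fOf e) = stb_vorbis.floor_count v.mem (fOf e) := by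
      simp only [vacc, voff]
      exact E2.i32 _ (by omega) (by omega) (by omega)
    have eft : stb_vorbis.floor_types s_11135b.mem (fOf e) fl = stb_vorbis.floor_types v.mem (fOf e) fl := by
      simp only [vacc, voff]
      exact E2.u16 _ (by omega) (by omega) (by omega)
    refine { toStable := hst, rip := w_rip, dead := ⟨fl, ?_, ?_⟩ }
    · rw [ec]
      exact hfllt
    · rw [eft, hftdef]
      omega
  case cont =>
    -- 0x111393 (cut17), the return of `get_bits(f, 1)`: the exit assertion `At2b`
    v_after_call w_rsp_11138e w_mem_11138e
    simp only [w_rdi_11138e] at w_same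
    have hs : Mem.SameExcept [⟨(e.reg .rsp).toNat - 3856, (e.reg .rsp).toNat - 3000⟩,
        ⟨(e.reg .rsp).toNat - 2360, (e.reg .rsp).toNat - 1336⟩,
        ⟨(e.reg .rdi).toNat + 48, (e.reg .rdi).toNat + 56⟩, ⟨(e.reg .rdi).toNat + 84, (e.reg .rdi).toNat + 96⟩,
        ⟨(e.reg .rdi).toNat + 136, (e.reg .rdi).toNat + 144⟩, ⟨(e.reg .rdi).toNat + 1484, (e.reg .rdi).toNat + 1749⟩,
        ⟨(e.reg .rdi).toNat + 1752, (e.reg .rdi).toNat + 1784⟩] v.mem s_11138er.mem := by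
      u_same
    have hsp : ∀ w, w ∈ [(⟨(e.reg .rsp).toNat - 3856, (e.reg .rsp).toNat - 3000⟩ : Span),
        ⟨(e.reg .rsp).toNat - 2360, (e.reg .rsp).toNat - 1336⟩,
        ⟨(e.reg .rdi).toNat + 48, (e.reg .rdi).toNat + 56⟩, ⟨(e.reg .rdi).toNat + 84, (e.reg .rdi).toNat + 96⟩,
        ⟨(e.reg .rdi).toNat + 136, (e.reg .rdi).toNat + 144⟩, ⟨(e.reg .rdi).toNat + 1484, (e.reg .rdi).toNat + 1749⟩,
        ⟨(e.reg .rdi).toNat + 1752, (e.reg .rdi).toNat + 1784⟩] →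
        SpanOK ysz v.mem (e.reg .rsp).toNat (fOf e) w := by
      intro w hw
      rw [List.mem_cons] at hw
      rcases hw with rfl | hw
      · exact SpanOK.below (by simp only []; omega) (by simp only []; omega)
      · rw [List.mem_cons] at hw
        rcases hw with rfl | hw
        · exact Or.inl ⟨by simp only []; omega, by simp only []; omega,
            Or.inr (Or.inr (Or.inr (by simp only []; omega)))⟩
        · exact SpanOK.of_winsBits hw
    have hun : ShadowUntouched v.mem s_11138er.mem := by v_untouched
    have hbits : Bits (RunBlk Ar len) len s_11138er.mem (fOf e) := by
      have h := w_post.bits.bits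
      rw [w_rdi_11138e] at h
      exact h
    have habi : abiInv s_11138er := by v_inv
    have hst := Stable.carry hat.toStable hs hsp hun w_rsp w_eq habi hbits
    obtain ⟨ech, emode, _, efloor⟩ := config_carry hinv he_room he_top hs hsp
    refine ReachVia.done (Or.inr (Or.inr ?_))
    refine { toStable := hst, rip := w_rip, r14 := ?_, i_lt := ?_, r13 := ?_, g := ?_, rbx := ?_ }
    · -- r14 = i: callee-saved, never written
      rw [w_kept .r14 rfl]
      exact c_r14
    · -- i < C
      rw [ech]
      exact hilt
    · -- r13 = map: callee-saved, never written
      rw [w_kept .r13 rfl, (emode (mOf e) hm.1 hm.2).2]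
      exact hat.r13
    · -- r15 = g = floor_config + 1596 floor, a floor of `f` (MP6)
      apply efloor
      rw [w_r15, hgn, ← hgdef]
      exact IsFloor.of_lt hfllt
    · -- rbx = r15
      rw [w_rbx, w_r15]

end Vorbis.Spec.vorbis_decode_packet_rest_2a
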